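-- pv_equiv track=rewrite | github.com/liujianfengv/protobuf_decoder | protobuf_decoder.py | parse_varint_limit
-- ===== SOURCE A (Python) =====
-- def parse_varint_limit(data, limit):
--     if limit == 0:
--         return None, None, False
--     res = data[0]
--     if not (res & 0x80):
--         return data[1:], res, True
--
--     for i in range(1, 10):
--         if i >= limit:
--             return None, None, False
--         byte = data[i]
--         res += (byte - 1) << 7 * i
--         if byte < 128:
--             return data[i + 1:], res, True
--
--     return None, None, False
-- ===== SOURCE B (Python) =====
-- def _dec(rest, fuel):
--     # recursively decode continuation bytes; returns (remaining bytes, local value) or None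
--     if fuel <= 0:
--         return None
--     b = rest[0]
--     if b < 128:
--         return rest[1:], b - 1
--     r = _dec(rest[1:], fuel - 1)
--     if r is None:
--         return None
--     tail, v = r
--     return tail, (b - 1) + (v << 7)
--
--
-- def parse_varint_limit(data, limit):
--     if limit == 0:
--         return None, None, False
--     b0 = data[0]
--     if not (b0 & 0x80):
--         return data[1:], b0, True
--     r = _dec(data[1:], min(limit - 1, 9))
--     if r is None:
--         return None, None, False
--     tail, v = r
--     return tail, b0 + (v << 7), True
-- ===== Notes on version B (the rewrite author's own statement) =====
-- stated objective: alternative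
-- what changed: Replaces A's indexed accumulating loop (special-cased first byte, running res += (byte-1)<<7*i over indices 1..9) by a recursive-descent decoder that destructures the tail list with a fuel counter min(limit-1,9), returns the leftover list directly instead of slicing by index, and combines the value Horner-style on the way back up as (b-1) + (v<<7).
import Mathlib
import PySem

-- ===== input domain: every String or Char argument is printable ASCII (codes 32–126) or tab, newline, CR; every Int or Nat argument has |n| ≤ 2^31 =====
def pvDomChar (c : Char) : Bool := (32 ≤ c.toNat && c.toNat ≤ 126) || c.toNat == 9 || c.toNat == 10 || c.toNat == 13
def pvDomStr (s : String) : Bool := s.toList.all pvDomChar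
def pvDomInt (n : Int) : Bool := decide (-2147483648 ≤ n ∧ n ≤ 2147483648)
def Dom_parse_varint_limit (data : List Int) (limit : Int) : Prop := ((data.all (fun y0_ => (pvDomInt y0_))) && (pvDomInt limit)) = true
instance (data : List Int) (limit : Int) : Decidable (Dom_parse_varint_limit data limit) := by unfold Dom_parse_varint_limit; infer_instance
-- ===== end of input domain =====

-- B replaces A's indexed accumulating loop by a recursive-descent decoder over the tail list that
-- combines the value Horner-style on the way back up; objective: alternative (same cost).

-- ===== PORT A =====
-- A's 'for i in range(1, 10)' loop; '<<' ported as '* 2^(7*i)', exact for a nonnegative shift.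
-- pyGet? = none is Python's IndexError; those inputs are outside Pre_, the port returns (none, none, false) there.
def pvLoopA (data : List Int) (limit : Int) (res : Int) (i : Nat) : Nat → Option (List Int) × Option Int × Bool
  | 0 => (none, none, false)
  | fuel + 1 =>
    if limit ≤ (i : Int) then (none, none, false)
    else
      match PySem.List.pyGet? data (i : Int) with
      | none => (none, none, false)
      | some byte =>
        let res' := res + (byte - 1) * 2 ^ (7 * i)
        if byte < 128 then
          (some (PySem.List.slice data (some ((i : Int) + 1)) none), some res', true)
        else pvLoopA data limit res' (i + 1) fuel

def parse_varint_limit (data : List Int) (limit : Int) : Option (List Int) × Option Int × Bool :=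
  if limit = 0 then (none, none, false)
  else
    match PySem.List.pyGet? data 0 with
    | none => (none, none, false)
    | some res =>
      if PySem.Int.band res 128 = 0 then (some (PySem.List.slice data (some 1) none), some res, true)
      else pvLoopA data limit res 1 9

-- ===== PORT B =====
-- Source B's _dec: recursion on the tail list with an Int fuel counter; none = failure (or the
-- IndexError rest[0] on empty rest, which is outside Pre_).
def pvDec (rest : List Int) (fuel : Int) : Option (List Int × Int) :=
  if _h : fuel ≤ 0 then none
  else
    match PySem.List.pyGet? rest 0 with
    | none => none
    | some b =>
      if b < 128 then some (PySem.List.slice rest (some 1) none, b - 1)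
      else
        match pvDec (PySem.List.slice rest (some 1) none) (fuel - 1) with
        | none => none
        | some (tail, v) => some (tail, (b - 1) + v * 2 ^ 7)
termination_by fuel.toNat
decreasing_by omega

def parse_varint_limit_alt (data : List Int) (limit : Int) : Option (List Int) × Option Int × Bool :=
  if limit = 0 then (none, none, false)
  else
    match PySem.List.pyGet? data 0 with
    | none => (none, none, false)
    | some b0 =>
      if PySem.Int.band b0 128 = 0 then (some (PySem.List.slice data (some 1) none), some b0, true)
      else
        match pvDec (PySem.List.slice data (some 1) none) (min (limit - 1) 9) with
        | none => (none, none, false)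
        | some (tail, v) => (some tail, some (b0 + v * 2 ^ 7), true)

-- ===== PRECONDITION & SPEC =====
-- Pre_ excludes exactly the inputs on which A raises IndexError: empty data with limit ≠ 0, or a
-- run of continuation bytes that reaches past the end of data before hitting the limit.
def Pre_parse_varint_limit (data : List Int) (limit : Int) : Prop :=
  limit = 0 ∨ (data ≠ [] ∧ (PySem.Int.band data.headI 128 = 0 ∨
    ∀ i ∈ List.range' 1 9, (i : Int) < limit →
      (∀ j ∈ List.range' 1 (i - 1), 128 ≤ data.getD j 0) → i < data.length))
instance (data : List Int) (limit : Int) : Decidable (Pre_parse_varint_limit data limit) := by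
  unfold Pre_parse_varint_limit; infer_instance

def pvWitness_parse_varint_limit : List Int × Int := ([5], 3)

def Spec_parse_varint_limit (data : List Int) (limit : Int) (out : Option (List Int) × Option Int × Bool) : Prop := out = parse_varint_limit_alt data limit
instance (data : List Int) (limit : Int) (out : Option (List Int) × Option Int × Bool) : Decidable (Spec_parse_varint_limit data limit out) := by unfold Spec_parse_varint_limit; infer_instance

-- ===== CLAIM (what is proved, stated in full; the proofs are below) =====
def Claim_equal_parse_varint_limit : Prop := ∀ (data : List Int) (limit : Int), Dom_parse_varint_limit data limit → Pre_parse_varint_limit data limit → Spec_parse_varint_limit data limit (parse_varint_limit data limit)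

-- ===== LEMMAS AND PROOFS =====
lemma pvLoopA_eq_dec (data : List Int) (limit : Int) :
    ∀ (F i : Nat) (res : Int),
      pvLoopA data limit res i F =
        match pvDec (data.drop i) (min (limit - i) F) with
        | none => (none, none, false)
        | some (tail, v) => (some tail, some (res + v * 2 ^ (7 * i)), true) := by
  intro F
  induction F with
  | zero =>
    intro i res
    have : min (limit - (i : Int)) (0 : Nat) ≤ 0 := by simp
    rw [pvDec, dif_pos this]
    simp [pvLoopA]
  | succ F ih =>
    intro i res
    by_cases hlim : limit ≤ (i : Int)
    · have h0 : min (limit - (i : Int)) ((F + 1 : Nat) : Int) ≤ 0 := by omega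
      rw [pvDec, dif_pos h0]
      simp [pvLoopA, hlim]
    · have h0 : ¬ min (limit - (i : Int)) ((F + 1 : Nat) : Int) ≤ 0 := by
        push_cast; omega
      rw [pvDec, dif_neg h0]
      have hget : PySem.List.pyGet? (data.drop i) 0 = PySem.List.pyGet? data (i : Int) := by
        have : ((0 : Nat) : Int) = (0 : Int) := rfl
        rw [← this, PySem.List.pyGet?_natCast, PySem.List.pyGet?_natCast]
        simp [List.getElem?_drop]
      simp only [pvLoopA, if_neg hlim, hget]
      rcases Option.eq_none_or_eq_some (PySem.List.pyGet? data (i : Int)) with hg | ⟨b, hg⟩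
      · simp [hg]
      · simp only [hg]
        have hslice : PySem.List.slice (data.drop i) (some 1) none = data.drop (i + 1) := by
          have : ((1 : Nat) : Int) = (1 : Int) := rfl
          rw [← this, PySem.List.slice_from_natCast, List.drop_drop]
        by_cases hb : b < 128
        · have hsl2 : PySem.List.slice data (some ((i : Int) + 1)) none = data.drop (i + 1) := by
            have : (i : Int) + 1 = ((i + 1 : Nat) : Int) := by push_cast; ring
            rw [this, PySem.List.slice_from_natCast]
          simp [hb, hslice, hsl2]
        · simp only [if_neg hb, hslice]
          have hfuel : min (limit - (i : Int)) ((F + 1 : Nat) : Int) - 1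
              = min (limit - ((i + 1 : Nat) : Int)) ((F : Nat) : Int) := by
            push_cast; omega
          rw [hfuel, ih (i + 1) (res + (b - 1) * 2 ^ (7 * i))]
          push_cast
          rcases Option.eq_none_or_eq_some (pvDec (data.drop (i + 1)) (min (limit - ((i : Int) + 1)) ((F : Nat) : Int))) with hd | ⟨⟨tail, v⟩, hd⟩
          · simp [hd]
          · simp only [hd]
            have : res + (b - 1) * 2 ^ (7 * i) + v * 2 ^ (7 * (i + 1))
                = res + ((b - 1) + v * 2 ^ 7) * 2 ^ (7 * i) := by ring
            simp [this]

lemma ports_agree (data : List Int) (limit : Int) :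
    parse_varint_limit data limit = parse_varint_limit_alt data limit := by
  unfold parse_varint_limit parse_varint_limit_alt
  by_cases h0 : limit = 0
  · simp [h0]
  · simp only [if_neg h0]
    rcases Option.eq_none_or_eq_some (PySem.List.pyGet? data 0) with hg | ⟨b0, hg⟩
    · simp [hg]
    · simp only [hg]
      by_cases hf : PySem.Int.band b0 128 = 0
      · simp [hf]
      · simp only [if_neg hf]
        rw [pvLoopA_eq_dec data limit 9 1 b0]
        have hsl : PySem.List.slice data (some 1) none = data.drop 1 := by
          have h1 : ((1 : Nat) : Int) = (1 : Int) := rfl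
          rw [← h1, PySem.List.slice_from_natCast]
        rw [hsl]
        push_cast
        simp
-- ===== VERDICT (by name: the statement is the Claim_ definition above) =====
theorem parse_varint_limit_spec : Claim_equal_parse_varint_limit := by
  intro data limit _ _
  unfold Spec_parse_varint_limit
  exact ports_agree data limit
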